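-- pv_equiv track=rewrite | github.com/nullco/advent_of_code | 2024/4/solution.py | get_antidiagonals
-- ===== SOURCE A (Python) =====
-- def get_antidiagonals(data):
--     rows = len(data)
--     columns = len(data[0])
--     diagonals = []
--     row = rows - 1
--     while row > -1:
--         r = row
--         c = 0
--         diagonal = []
--         while c < columns and r < rows:
--             diagonal.append(data[r][c])
--             r += 1
--             c += 1
--         diagonals.append("".join(diagonal))
--         row -= 1
--     row += 1
--     col = 1
--     while col < columns:
--         r = row
--         c = col
--         diagonal = []
--         while c < columns and r > -1:
--             diagonal.append(data[r][c])
--             r += 1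
--             c += 1
--         diagonals.append("".join(diagonal))
--         col += 1
--     return diagonals
-- ===== SOURCE B (Python) =====
-- # Group cells by antidiagonal key d = r - c in one pass over the grid, then emit
-- # the buckets for d = rows-1 .. 0 and d = -1 .. -(columns-1); top-to-bottom fill
-- # order inside each bucket reproduces A's two explicit diagonal walks.
-- def get_antidiagonals(data):
--     rows = len(data)
--     columns = len(data[0])
--     cells = [(r - c, data[r][c]) for r in range(rows) for c in range(columns)]
--     buckets = {}
--     for d, ch in cells:
--         buckets[d] = buckets.get(d, []) + [ch]
--     keys = [rows - 1 - i for i in range(rows)] + [-(i + 1) for i in range(columns - 1)]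
--     return ["".join(buckets.get(d, [])) for d in keys]
-- ===== Notes on version B (the rewrite author's own statement) =====
-- stated objective: alternative
-- what changed: B replaces A's two explicit diagonal-walk loops by a single pass over all grid cells that groups characters into a dict keyed by r-c, then emits the buckets for keys rows-1..0 followed by -1..-(columns-1).
-- crash fix: On nonempty grids whose rows all have at least len(data[0]) characters but whose width exceeds len(data)+1, A raises IndexError (its second walk omits the r < rows bound), while B returns the full list of antidiagonals. — e.g. on get_antidiagonals(["abc"]): A raises IndexError, B returns ["a", "b", "c"]
import Mathlib
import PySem

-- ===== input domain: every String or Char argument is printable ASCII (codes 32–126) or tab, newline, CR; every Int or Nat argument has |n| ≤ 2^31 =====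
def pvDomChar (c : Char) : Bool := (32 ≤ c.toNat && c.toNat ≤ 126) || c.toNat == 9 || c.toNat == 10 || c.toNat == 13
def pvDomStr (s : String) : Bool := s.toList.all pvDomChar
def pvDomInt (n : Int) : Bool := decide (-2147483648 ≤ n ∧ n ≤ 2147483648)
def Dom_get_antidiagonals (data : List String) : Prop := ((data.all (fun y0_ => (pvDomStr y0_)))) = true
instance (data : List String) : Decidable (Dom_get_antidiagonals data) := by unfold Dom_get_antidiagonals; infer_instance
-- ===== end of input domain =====

-- B groups the grid's characters into a dict of antidiagonal buckets keyed by r - c in one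
-- pass, instead of A's two explicit diagonal-walk loops; same cost, different structure.
-- Shared primitive: data[r][c] for nonnegative indices (Python raises IndexError out of
-- range; all admitted inputs keep the reads in range, where List.getD/toList.getD is exact).
def pyCell (data : List String) (r c : Nat) : Char :=
  ((data.getD r "").toList.getD c ' ')

-- ===== PORT A =====
-- inner loop of A's first phase: while c < columns and r < rows.  The first argument is
-- fuel making the recursion structural; callers pass columns ≥ the number of iterations,
-- so the guard (not the fuel) always ends the loop.
def walkA (data : List String) (rows columns : Nat) : Nat → Nat → Nat → List Char
  | 0, _, _ => []
  | fuel + 1, r, c =>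
    if c < columns ∧ r < rows then pyCell data r c :: walkA data rows columns fuel (r + 1) (c + 1)
    else []

-- inner loop of A's second phase: while c < columns and r > -1; r starts at 0 and only
-- grows, so the r > -1 test is always true (as in the Python) and is not represented.
def walkA2 (data : List String) (columns : Nat) : Nat → Nat → Nat → List Char
  | 0, _, _ => []
  | fuel + 1, r, c =>
    if c < columns then pyCell data r c :: walkA2 data columns fuel (r + 1) (c + 1)
    else []

-- first outer loop: row = rows-1 down to 0 (argument k = row + 1)
def phase1 (data : List String) (rows columns : Nat) : Nat → List String
  | 0 => []
  | k + 1 => String.ofList (walkA data rows columns columns k 0) :: phase1 data rows columns k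

-- second outer loop: col = 1 while col < columns (row has been reset to 0); structural fuel again
def phase2 (data : List String) (columns : Nat) : Nat → Nat → List String
  | 0, _ => []
  | fuel + 1, col =>
    if col < columns then
      String.ofList (walkA2 data columns columns 0 col) :: phase2 data columns fuel (col + 1)
    else []

def get_antidiagonals (data : List String) : List String :=
  let rows := data.length
  let columns := (data.getD 0 "").length  -- len(data[0]); IndexError on [] is excluded by Pre_
  phase1 data rows columns rows ++ phase2 data columns columns 1

-- ===== PORT B =====
def get_antidiagonals_alt (data : List String) : List String :=
  let rows := data.length
  let columns := (data.getD 0 "").length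
  let cells : List (Int × Char) :=
    (List.range rows).flatMap (fun (r : Nat) =>
      (List.range columns).map (fun (c : Nat) => ((r : Int) - (c : Int), pyCell data r c)))
  let buckets : PySem.Dict Int (List Char) :=
    cells.foldl (fun d p => d.modify p.1 [] (· ++ [p.2])) PySem.Dict.empty
  let keys : List Int :=
    (List.range rows).map (fun (i : Nat) => (rows : Int) - 1 - (i : Int)) ++
      (List.range (columns - 1)).map (fun (i : Nat) => -((i : Int) + 1))
  keys.map (fun d => String.ofList (buckets.getD d []))

-- ===== PRECONDITION & SPEC =====
-- Exactly the inputs on which A returns: data nonempty (len(data[0]) raises on []), every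
-- row at least as long as row 0 (a shorter row hits IndexError at data[r][c]), and width
-- at most height + 1 (A's second walk omits the r < rows bound and raises on wider grids).
def Pre_get_antidiagonals (data : List String) : Prop :=
  data ≠ [] ∧ (∀ s ∈ data, (data.getD 0 "").length ≤ s.length) ∧
    (data.getD 0 "").length ≤ data.length + 1

instance (data : List String) : Decidable (Pre_get_antidiagonals data) := by
  unfold Pre_get_antidiagonals; infer_instance

def pvWitness_get_antidiagonals : List String := ["abc", "def", "ghi"]

-- On nonempty grids whose rows all have at least len(data[0]) characters but whose width
-- exceeds len(data)+1, A raises IndexError (its second walk omits the r < rows bound),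
-- while B returns the full list of antidiagonals.
def Raises_get_antidiagonals (data : List String) : Prop :=
  data ≠ [] ∧ (∀ s ∈ data, (data.getD 0 "").length ≤ s.length) ∧
    data.length + 1 < (data.getD 0 "").length

instance (data : List String) : Decidable (Raises_get_antidiagonals data) := by
  unfold Raises_get_antidiagonals; infer_instance

def pvRaiseWitness_get_antidiagonals : List String := ["abc"]

def pvRaiseWitnessOut_get_antidiagonals : List String := ["a", "b", "c"]

def Spec_get_antidiagonals (data : List String) (out : List String) : Prop :=
  out = get_antidiagonals_alt data

instance (data : List String) (out : List String) : Decidable (Spec_get_antidiagonals data out) := by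
  unfold Spec_get_antidiagonals; infer_instance

-- ===== CLAIM (what is proved, stated in full; the proofs are below) =====
def Claim_equal_get_antidiagonals : Prop :=
  ∀ (data : List String), Dom_get_antidiagonals data → Pre_get_antidiagonals data →
    Spec_get_antidiagonals data (get_antidiagonals data)

def Claim_raises_get_antidiagonals : Prop :=
  (∀ (data : List String), Dom_get_antidiagonals data → Raises_get_antidiagonals data →
      ¬ Pre_get_antidiagonals data) ∧
    (Dom_get_antidiagonals (pvRaiseWitness_get_antidiagonals) ∧
      Raises_get_antidiagonals (pvRaiseWitness_get_antidiagonals) ∧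
      get_antidiagonals_alt (pvRaiseWitness_get_antidiagonals) = pvRaiseWitnessOut_get_antidiagonals)

-- ===== LEMMAS AND PROOFS =====

-- the characters A and B both collect on diagonal d, as one step per row r
def stepD (data : List String) (C : Nat) (d : Int) (r : Nat) : List Char :=
  if 0 ≤ (r : Int) - d ∧ (r : Int) - d < (C : Int) then
    [pyCell data r ((r : Int) - d).toNat]
  else []

def diagD (data : List String) (R C : Nat) (d : Int) : List Char :=
  (List.range R).flatMap (stepD data C d)

lemma walkA_eq (data : List String) (R C : Nat) (d : Int) :
    ∀ (f r c : Nat), C - c ≤ f → (r : Int) - (c : Int) = d →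
      walkA data R C f r c = (List.range' r (R - r)).flatMap (stepD data C d) := by
  intro f
  induction f with
  | zero =>
    intro r c hf hd
    rw [walkA]
    symm
    rw [List.flatMap_eq_nil_iff]
    intro x hx
    have hx' : r ≤ x := (List.mem_range'_1.mp hx).1
    simp only [stepD]
    rw [if_neg]
    omega
  | succ f ih =>
    intro r c hf hd
    by_cases hc : c < C
    · by_cases hr : r < R
      · rw [walkA]
        simp only [if_pos (⟨hc, hr⟩ : c < C ∧ r < R)]
        have hR : R - r = (R - (r + 1)) + 1 := by omega
        rw [hR, List.range'_succ, List.flatMap_cons]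
        have hstep : stepD data C d r = [pyCell data r c] := by
          have h1 : (r : Int) - d = (c : Int) := by omega
          simp [stepD, h1, hc]
        rw [hstep, ih (r + 1) (c + 1) (by omega) (by push_cast; omega)]
        rfl
      · rw [walkA]
        simp only [if_neg (by omega : ¬(c < C ∧ r < R))]
        rw [show R - r = 0 by omega]
        simp
    · rw [walkA]
      simp only [if_neg (by omega : ¬(c < C ∧ r < R))]
      symm
      rw [List.flatMap_eq_nil_iff]
      intro x hx
      have hx' : r ≤ x := (List.mem_range'_1.mp hx).1
      simp only [stepD]
      rw [if_neg]
      omega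

lemma walkA2_eq_walkA (data : List String) (R C : Nat) :
    ∀ (f r c : Nat), r + C ≤ R + c →
      walkA2 data C f r c = walkA data R C f r c := by
  intro f
  induction f with
  | zero => intro r c _; rw [walkA2, walkA]
  | succ f ih =>
    intro r c hrc
    by_cases hc : c < C
    · rw [walkA2, walkA]
      simp only [if_pos hc, if_pos (⟨hc, by omega⟩ : c < C ∧ r < R)]
      rw [ih (r + 1) (c + 1) (by omega)]
    · rw [walkA2, walkA]
      simp only [if_neg hc, if_neg (by omega : ¬(c < C ∧ r < R))]

lemma diag_eq_walkA (data : List String) (R C : Nat) (d : Nat) (hd : d ≤ R) :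
    diagD data R C (d : Int) = walkA data R C C d 0 := by
  rw [walkA_eq data R C (d : Int) C d 0 (by omega) (by push_cast; ring)]
  unfold diagD
  rw [List.range_eq_range']
  have hsplit : List.range' 0 R = List.range' 0 d ++ List.range' d (R - d) := by
    have h2 : List.range' 0 (d + (R - d)) = List.range' 0 d ++ List.range' d (R - d) := by
      rw [← List.range'_append]; norm_num
    rw [← h2]; congr 1; omega
  rw [hsplit, List.flatMap_append]
  have hpre : (List.range' 0 d).flatMap (stepD data C (d : Int)) = [] := by
    rw [List.flatMap_eq_nil_iff]
    intro x hx
    have hx' : x < d := by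
      have := (List.mem_range'_1.mp hx).2
      omega
    simp only [stepD]
    rw [if_neg]
    omega
  rw [hpre, List.nil_append]

lemma phase1_eq (data : List String) (R C : Nat) :
    ∀ k, phase1 data R C k =
      (List.range k).map (fun i => String.ofList (walkA data R C C (k - 1 - i) 0)) := by
  intro k
  induction k with
  | zero => simp [phase1]
  | succ k ih =>
    rw [phase1, ih, List.range_succ_eq_map, List.map_cons, List.map_map]
    simp only [Nat.add_sub_cancel, Nat.sub_zero]
    congr 1
    apply List.map_congr_left
    intro i _
    simp only [Function.comp_apply]
    congr 2
    omega

lemma phase2_eq (data : List String) (C : Nat) :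
    ∀ (f col : Nat), C - col ≤ f →
      phase2 data C f col =
        (List.range' col (C - col)).map (fun c => String.ofList (walkA2 data C C 0 c)) := by
  intro f
  induction f with
  | zero =>
    intro col hf
    rw [phase2, show C - col = 0 by omega]
    simp
  | succ f ih =>
    intro col hf
    by_cases hc : col < C
    · rw [phase2]
      simp only [if_pos hc]
      rw [ih (col + 1) (by omega)]
      have hC : C - col = (C - (col + 1)) + 1 := by omega
      rw [hC, List.range'_succ, List.map_cons]
    · rw [phase2, show C - col = 0 by omega]
      simp [hc]

lemma filter_range_hit (data : List String) (r : Nat) (d : Int) :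
    ∀ n, ((List.range n).filter (fun (c : Nat) => ((r : Int) - (c : Int) == d))).map
        (fun c => pyCell data r c) = stepD data n d r := by
  intro n
  induction n with
  | zero =>
    simp only [List.range_zero, List.filter_nil, List.map_nil, stepD]
    split_ifs with hc
    · exact absurd hc (by omega)
    · rfl
  | succ n ih =>
    rw [List.range_succ, List.filter_append, List.map_append, ih]
    by_cases h : (r : Int) - (n : Int) = d
    · have h2 : ((r : Int) - d).toNat = n := by omega
      have hfil : List.filter (fun (c : Nat) => ((r : Int) - (c : Int) == d)) [n] = [n] := by
        simp [h]
      have h1 : stepD data n d r = [] := by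
        simp only [stepD]; rw [if_neg]; omega
      rw [hfil, h1]
      simp only [List.nil_append, List.map_cons, List.map_nil, stepD]
      rw [if_pos ⟨by omega, by omega⟩, h2]
    · have h1 : (List.filter (fun (c : Nat) => ((r : Int) - (c : Int) == d)) [n]) = [] := by
        simp [h]
      rw [h1, List.map_nil, List.append_nil]
      simp only [stepD]
      split_ifs with h2 h3 h3
      · rfl
      · omega
      · omega
      · rfl

lemma bucket_getD (data : List String) (R C : Nat) (d : Int) :
    (((List.range R).flatMap (fun (r : Nat) =>
        (List.range C).map (fun (c : Nat) => ((r : Int) - (c : Int), pyCell data r c)))).foldl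
      (fun dd p => dd.modify p.1 [] (· ++ [p.2])) PySem.Dict.empty).getD d [] =
      diagD data R C d := by
  rw [PySem.Dict.getD_foldl_modify_append, PySem.Dict.getD_empty, List.nil_append]
  unfold diagD
  rw [List.filter_flatMap, List.map_flatMap]
  apply List.flatMap_congr
  intro r _
  rw [List.filter_map, List.map_map]
  exact filter_range_hit data r d C

-- list-level assembly of both ports, for any grid sizes with C ≤ R + 1
lemma assemble (data : List String) (R C : Nat) (h : C ≤ R + 1) :
    phase1 data R C R ++ phase2 data C C 1 =
      ((List.range R).map (fun (i : Nat) => (R : Int) - 1 - (i : Int)) ++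
          (List.range (C - 1)).map (fun (i : Nat) => -((i : Int) + 1))).map
        (fun d => String.ofList
          ((((List.range R).flatMap (fun (r : Nat) =>
              (List.range C).map (fun (c : Nat) => ((r : Int) - (c : Int), pyCell data r c)))).foldl
            (fun dd p => dd.modify p.1 [] (· ++ [p.2])) PySem.Dict.empty).getD d [])) := by
  rw [List.map_append]
  congr 1
  · rw [phase1_eq, List.map_map]
    apply List.map_congr_left
    intro i hi
    have hi' : i < R := List.mem_range.mp hi
    simp only [Function.comp_apply]
    rw [bucket_getD]
    have hcast : ((R : Int) - 1 - (i : Int)) = ((R - 1 - i : Nat) : Int) := by omega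
    rw [hcast, diag_eq_walkA data R C (R - 1 - i) (by omega)]
  · rw [phase2_eq data C C 1 (by omega), List.range'_eq_map_range, List.map_map, List.map_map]
    apply List.map_congr_left
    intro i hi
    have hi' : i < C - 1 := List.mem_range.mp hi
    simp only [Function.comp_apply]
    rw [bucket_getD]
    have hw : walkA2 data C C 0 (1 + i) = walkA data R C C 0 (1 + i) :=
      walkA2_eq_walkA data R C C 0 (1 + i) (by omega)
    rw [hw, walkA_eq data R C (-((i : Int) + 1)) C 0 (1 + i) (by omega) (by push_cast; ring)]
    unfold diagD
    rw [List.range_eq_range']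
    simp only [Nat.sub_zero]

-- ===== VERDICT (by name: the statement is the Claim_ definition above) =====
theorem get_antidiagonals_spec : Claim_equal_get_antidiagonals := by
  intro data _ hpre
  obtain ⟨-, -, hCR⟩ := hpre
  show get_antidiagonals data = get_antidiagonals_alt data
  unfold get_antidiagonals get_antidiagonals_alt
  exact assemble data data.length (data.getD 0 "").length hCR

theorem get_antidiagonals_raises : Claim_raises_get_antidiagonals := by
  unfold Claim_raises_get_antidiagonals
  constructor
  · intro data _ hr hpre
    obtain ⟨-, -, h1⟩ := hr
    obtain ⟨-, -, h2⟩ := hpre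
    omega
  · exact ⟨by decide, by decide, by decide⟩

-- self-check for the raises block: the witness lies in Raises_ and B's port returns the stated value there
theorem pvRaiseWitness_ok :
    Raises_get_antidiagonals pvRaiseWitness_get_antidiagonals ∧
      get_antidiagonals_alt pvRaiseWitness_get_antidiagonals = pvRaiseWitnessOut_get_antidiagonals := by
  have h := get_antidiagonals_raises
  unfold Claim_raises_get_antidiagonals at h
  exact h.2.2
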